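-- pv_equiv track=rewrite | github.com/rushil1510/COL100-Assignments | SudokuSolver.py | get_position_inside_block
-- ===== SOURCE A (Python) =====
-- def get_block_num(sudoku,pos):
--     r=pos[0]
--     c=pos[1]
--     x=int((r-1)/3)
--     y=int((c-1)/3)+1
--     b=y+3*x
--     return b
--
-- def get_position_inside_block(sudoku,pos):
--     c=0
--     x=get_block_num(sudoku,pos)
--     for i in range(1,10):
--         for j in range(1,10):
--             if get_block_num(sudoku,(i,j))==x:
--                 c+=1
--             if pos==(i,j):
--                 return c
--     return 0
-- ===== SOURCE B (Python) =====
-- def get_position_inside_block(sudoku, pos):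
--     r, c = pos
--     if 1 <= r <= 9 and 1 <= c <= 9:
--         return ((r - 1) % 3) * 3 + ((c - 1) % 3) + 1
--     return 0
-- ===== Notes on version B (the rewrite author's own statement) =====
-- stated objective: simpler
-- what changed: Replaces the 81-cell nested scan counting same-block cells up to pos with a closed-form row-major rank ((r-1)%3)*3+((c-1)%3)+1 guarded by the 1..9 range check (0 outside, as A's fall-through).
import Mathlib
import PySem

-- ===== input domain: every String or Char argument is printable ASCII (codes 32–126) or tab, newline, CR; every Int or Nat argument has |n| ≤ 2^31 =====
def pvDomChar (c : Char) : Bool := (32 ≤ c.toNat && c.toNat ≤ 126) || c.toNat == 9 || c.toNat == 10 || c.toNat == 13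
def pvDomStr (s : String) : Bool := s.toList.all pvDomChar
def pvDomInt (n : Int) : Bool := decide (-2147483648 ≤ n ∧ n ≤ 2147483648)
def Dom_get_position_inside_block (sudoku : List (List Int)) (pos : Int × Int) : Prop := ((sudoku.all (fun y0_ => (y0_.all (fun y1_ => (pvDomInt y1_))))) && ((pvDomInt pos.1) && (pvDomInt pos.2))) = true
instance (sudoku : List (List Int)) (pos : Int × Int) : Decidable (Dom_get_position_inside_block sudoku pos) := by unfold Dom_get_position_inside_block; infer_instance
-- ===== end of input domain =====

-- B replaces A's 81-cell nested scan with a closed-form block-local rank (objective: simpler).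

-- ===== PORT A =====
-- int((r-1)/3): true division then int() truncates toward zero = Int.tdiv on the |n| ≤ 2^31 domain (float division is exact enough there)
def get_block_num (sudoku : List (List Int)) (pos : Int × Int) : Int :=
  let r := pos.1
  let c := pos.2
  let x := Int.tdiv (r - 1) 3
  let y := Int.tdiv (c - 1) 3 + 1
  y + 3 * x

-- inner `for j` loop: returns (early-return value if any, count after the loop)
def gpibInner (sudoku : List (List Int)) (pos : Int × Int) (x : Int) (i : Int) :
    List Int → Int → Option Int × Int
  | [], c => (none, c)
  | j :: js, c =>
    let c' := if get_block_num sudoku (i, j) = x then c + 1 else c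
    if pos = (i, j) then (some c', c') else gpibInner sudoku pos x i js c'

-- outer `for i` loop
def gpibOuter (sudoku : List (List Int)) (pos : Int × Int) (x : Int) :
    List Int → Int → Option Int
  | [], _ => none
  | i :: is, c =>
    match gpibInner sudoku pos x i (PySem.List.pyRange 1 10 1) c with
    | (some v, _) => some v
    | (none, c') => gpibOuter sudoku pos x is c'

def get_position_inside_block (sudoku : List (List Int)) (pos : Int × Int) : Int :=
  let x := get_block_num sudoku pos
  (gpibOuter sudoku pos x (PySem.List.pyRange 1 10 1) 0).getD 0

-- ===== PORT B =====
def get_position_inside_block_alt (sudoku : List (List Int)) (pos : Int × Int) : Int :=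
  let r := pos.1
  let c := pos.2
  if 1 ≤ r ∧ r ≤ 9 ∧ 1 ≤ c ∧ c ≤ 9 then
    PySem.Int.mod (r - 1) 3 * 3 + PySem.Int.mod (c - 1) 3 + 1
  else 0

-- ===== PRECONDITION & SPEC =====
def Spec_get_position_inside_block (sudoku : List (List Int)) (pos : Int × Int) (out : Int) : Prop := out = get_position_inside_block_alt sudoku pos
instance (sudoku : List (List Int)) (pos : Int × Int) (out : Int) : Decidable (Spec_get_position_inside_block sudoku pos out) := by unfold Spec_get_position_inside_block; infer_instance

-- ===== CLAIM (what is proved, stated in full; the proofs are below) =====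
def Claim_equal_get_position_inside_block : Prop := ∀ (sudoku : List (List Int)) (pos : Int × Int), Dom_get_position_inside_block sudoku pos → Spec_get_position_inside_block sudoku pos (get_position_inside_block sudoku pos)

-- ===== LEMMAS AND PROOFS =====

lemma gpibInner_none (sudoku : List (List Int)) (pos : Int × Int) (x i : Int)
    (js : List Int) (c : Int) (h : ∀ j ∈ js, pos ≠ (i, j)) :
    (gpibInner sudoku pos x i js c).1 = none := by
  induction js generalizing c with
  | nil => rfl
  | cons j js ih =>
    simp only [gpibInner]
    rw [if_neg (h j (by simp))]
    exact ih _ (fun j' hj' => h j' (by simp [hj']))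

lemma gpibOuter_none (sudoku : List (List Int)) (pos : Int × Int) (x : Int)
    (is : List Int) (c : Int) (h : ∀ i ∈ is, ∀ j ∈ PySem.List.pyRange 1 10 1, pos ≠ (i, j)) :
    gpibOuter sudoku pos x is c = none := by
  induction is generalizing c with
  | nil => rfl
  | cons i is ih =>
    simp only [gpibOuter]
    have hinner := gpibInner_none sudoku pos x i (PySem.List.pyRange 1 10 1) c (h i (by simp))
    rcases hres : gpibInner sudoku pos x i (PySem.List.pyRange 1 10 1) c with ⟨o, c'⟩
    rw [hres] at hinner
    simp at hinner
    subst hinner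
    exact ih _ (fun i' hi' => h i' (by simp [hi']))

lemma gpib_out_of_range (sudoku : List (List Int)) (r c : Int)
    (h : ¬ (1 ≤ r ∧ r ≤ 9 ∧ 1 ≤ c ∧ c ≤ 9)) :
    get_position_inside_block sudoku (r, c) = 0 := by
  show (gpibOuter sudoku (r, c) (get_block_num sudoku (r, c)) (PySem.List.pyRange 1 10 1) 0).getD 0 = 0
  have hnone := gpibOuter_none sudoku (r, c) (get_block_num sudoku (r, c))
      (PySem.List.pyRange 1 10 1) 0 ?_
  · rw [hnone]; rfl
  intro i hi j hj heq
  have hi' : 1 ≤ i ∧ i ≤ 9 := by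
    have := (PySem.List.mem_pyRange_one (a := 1) (b := 10) (x := i)).mp hi
    omega
  have hj' : 1 ≤ j ∧ j ≤ 9 := by
    have := (PySem.List.mem_pyRange_one (a := 1) (b := 10) (x := j)).mp hj
    omega
  have : r = i ∧ c = j := ⟨congrArg Prod.fst heq, congrArg Prod.snd heq⟩
  omega

-- ===== VERDICT (by name: the statement is the Claim_ definition above) =====
theorem get_position_inside_block_spec : Claim_equal_get_position_inside_block := by
  intro sudoku pos _
  unfold Spec_get_position_inside_block
  obtain ⟨r, c⟩ := pos
  by_cases h : 1 ≤ r ∧ r ≤ 9 ∧ 1 ≤ c ∧ c ≤ 9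
  · obtain ⟨h1, h2, h3, h4⟩ := h
    interval_cases r <;> interval_cases c <;> rfl
  · rw [gpib_out_of_range sudoku r c h]
    simp only [get_position_inside_block_alt]
    rw [if_neg h]
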